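-- pv_equiv track=rewrite | github.com/williamcorrias/MAYA-Password-Benchmarking | script/test/tester.py | custom_key_order
-- ===== SOURCE A (Python) =====
-- def custom_key_order(d):
--     keys = list(d.keys())
--
--     keys = [k for k in keys if k not in ('read_train_passwords', 'read_test_passwords')]
--
--     ordered_keys = []
--     if 'read_train_passwords' in d:
--         ordered_keys.append('read_train_passwords')
--     if 'read_test_passwords' in d:
--         ordered_keys.append('read_test_passwords')
--     ordered_keys += keys
--
--     return {k: d[k] for k in ordered_keys}
-- ===== SOURCE B (Python) =====
-- def custom_key_order(d):
--     def priority(k):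
--         if k == 'read_train_passwords':
--             return 0
--         if k == 'read_test_passwords':
--             return 1
--         return 2
--     return {k: d[k] for k in sorted(d, key=priority)}
-- ===== Notes on version B (the rewrite author's own statement) =====
-- stated objective: simpler
-- what changed: Replaces the filter-then-conditionally-prepend construction with a single stable sort of the keys under a 3-valued priority key (train=0, test=1, other=2), relying on sort stability to keep the remaining keys in original order.
import Mathlib
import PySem

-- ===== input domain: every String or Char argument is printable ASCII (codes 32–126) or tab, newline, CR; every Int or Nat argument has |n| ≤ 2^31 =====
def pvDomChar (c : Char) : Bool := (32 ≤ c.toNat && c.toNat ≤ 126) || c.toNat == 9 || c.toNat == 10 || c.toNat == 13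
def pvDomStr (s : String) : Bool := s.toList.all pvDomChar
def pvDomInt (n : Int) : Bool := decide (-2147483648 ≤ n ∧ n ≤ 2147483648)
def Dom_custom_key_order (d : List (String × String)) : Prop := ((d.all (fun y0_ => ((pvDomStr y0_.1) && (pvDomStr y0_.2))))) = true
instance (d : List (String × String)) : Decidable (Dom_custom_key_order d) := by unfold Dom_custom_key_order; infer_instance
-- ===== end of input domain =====

-- B replaces A's filter-then-conditionally-prepend construction by one stable sort of the
-- keys under a 3-valued priority key; same result on every dict (nodup-key association list).


-- ===== PORT A =====
-- keys = list(d.keys()); keys = [k for k in keys if k not in (...)];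
-- ordered_keys = [] (+ train if present) (+ test if present) + keys; {k: d[k] for k in ordered_keys}
def custom_key_order (d : List (String × String)) : List (String × String) :=
  let keys0 := d.map Prod.fst
  let keys := keys0.filter (fun k => !(k == "read_train_passwords" || k == "read_test_passwords"))
  let ordered1 : List String :=
    if keys0.contains "read_train_passwords" then [] ++ ["read_train_passwords"] else []
  let ordered2 : List String :=
    if keys0.contains "read_test_passwords" then ordered1 ++ ["read_test_passwords"] else ordered1
  let orderedKeys := ordered2 ++ keys
  orderedKeys.map (fun k => (k, (List.lookup k d).getD ""))

-- ===== PORT B =====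
-- def priority(k): 0 for train, 1 for test, else 2
def pvPriority (k : String) : Int :=
  if k == "read_train_passwords" then 0
  else if k == "read_test_passwords" then 1
  else 2

-- {k: d[k] for k in sorted(d, key=priority)}
def custom_key_order_alt (d : List (String × String)) : List (String × String) :=
  (PySem.List.sorted (d.map Prod.fst) pvPriority false).map
    (fun k => (k, (List.lookup k d).getD ""))

-- ===== PRECONDITION & SPEC =====
-- Pre_ restricts d to faithful representations of a Python dict: keys pairwise distinct
-- (a Python dict cannot contain duplicate keys, so no input A runs on is excluded).
def Pre_custom_key_order (d : List (String × String)) : Prop := (d.map Prod.fst).Nodup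
instance (d : List (String × String)) : Decidable (Pre_custom_key_order d) := by unfold Pre_custom_key_order; infer_instance

def pvWitness_custom_key_order : (List (String × String)) :=
  [("read_test_passwords", "t"), ("alpha", "1"), ("read_train_passwords", "r"), ("beta", "2")]

def Spec_custom_key_order (d : List (String × String)) (out : List (String × String)) : Prop := out = custom_key_order_alt d
instance (d : List (String × String)) (out : List (String × String)) : Decidable (Spec_custom_key_order d out) := by unfold Spec_custom_key_order; infer_instance

-- ===== CLAIM (what is proved, stated in full; the proofs are below) =====
def Claim_equal_custom_key_order : Prop := ∀ (d : List (String × String)), Dom_custom_key_order d → Pre_custom_key_order d → Spec_custom_key_order d (custom_key_order d)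

-- ===== LEMMAS AND PROOFS =====

lemma insertBy_append_not {α : Type} (before : α → α → Bool) (x : α) (l t : List α)
    (h : ∀ y ∈ l, before x y = false) :
    PySem.List.insertBy before x (l ++ t) = l ++ PySem.List.insertBy before x t := by
  induction l with
  | nil => simp
  | cons a l ih =>
    have ha : before x a = false := h a (by simp)
    simp only [List.cons_append, PySem.List.insertBy, ha]
    simp [ih (fun y hy => h y (by simp [hy]))]

lemma insertBy_all_before {α : Type} (before : α → α → Bool) (x : α) (t : List α)
    (h : ∀ y ∈ t, before x y = true) :
    PySem.List.insertBy before x t = x :: t := by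
  cases t with
  | nil => rfl
  | cons a l => simp [PySem.List.insertBy, h a (by simp)]

lemma foldl_tri (xs a0 a1 a2 : List String)
    (h0 : ∀ y ∈ a0, pvPriority y = 0) (h1 : ∀ y ∈ a1, pvPriority y = 1)
    (h2 : ∀ y ∈ a2, pvPriority y = 2) :
    xs.foldl (fun acc x => PySem.List.insertBy (fun a b => decide (pvPriority a < pvPriority b)) x acc)
      (a0 ++ a1 ++ a2)
    = (a0 ++ xs.filter (fun k => pvPriority k == 0))
      ++ (a1 ++ xs.filter (fun k => pvPriority k == 1))
      ++ (a2 ++ xs.filter (fun k => pvPriority k == 2)) := by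
  induction xs generalizing a0 a1 a2 with
  | nil => simp
  | cons x xs ih =>
    have hx : pvPriority x = 0 ∨ pvPriority x = 1 ∨ pvPriority x = 2 := by
      unfold pvPriority; split_ifs <;> simp
    simp only [List.foldl_cons]
    rcases hx with hx | hx | hx
    · have step : PySem.List.insertBy (fun a b => decide (pvPriority a < pvPriority b)) x (a0 ++ a1 ++ a2)
          = (a0 ++ [x]) ++ a1 ++ a2 := by
        rw [List.append_assoc, insertBy_append_not _ _ _ _ (fun y hy => by simp [hx, h0 y hy]),
            insertBy_all_before _ _ _ (fun y hy => by
              rcases List.mem_append.mp hy with hy | hy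
              · simp [hx, h1 y hy]
              · simp [hx, h2 y hy])]
        simp
      rw [step, ih (a0 ++ [x]) a1 a2
            (fun y hy => by rcases List.mem_append.mp hy with hy | hy
                            · exact h0 y hy
                            · simp at hy; simp [hy, hx]) h1 h2]
      simp [hx, List.append_assoc]
    · have step : PySem.List.insertBy (fun a b => decide (pvPriority a < pvPriority b)) x (a0 ++ a1 ++ a2)
          = a0 ++ (a1 ++ [x]) ++ a2 := by
        rw [insertBy_append_not _ _ _ _ (fun y hy => by
              rcases List.mem_append.mp hy with hy | hy
              · simp [hx, h0 y hy]
              · simp [hx, h1 y hy]),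
            insertBy_all_before _ _ _ (fun y hy => by simp [hx, h2 y hy])]
        simp
      rw [step, ih a0 (a1 ++ [x]) a2 h0
            (fun y hy => by rcases List.mem_append.mp hy with hy | hy
                            · exact h1 y hy
                            · simp at hy; simp [hy, hx]) h2]
      simp [hx, List.append_assoc]
    · have step : PySem.List.insertBy (fun a b => decide (pvPriority a < pvPriority b)) x (a0 ++ a1 ++ a2)
          = a0 ++ a1 ++ (a2 ++ [x]) := by
        rw [PySem.List.insertBy_of_forall_not_before _ _ _ (fun y hy => by
              rcases List.mem_append.mp hy with hy | hy
              · rcases List.mem_append.mp hy with hy | hy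
                · simp [hx, h0 y hy]
                · simp [hx, h1 y hy]
              · simp [hx, h2 y hy])]
        simp
      rw [step, ih a0 a1 (a2 ++ [x]) h0 h1
            (fun y hy => by rcases List.mem_append.mp hy with hy | hy
                            · exact h2 y hy
                            · simp at hy; simp [hy, hx])]
      simp [hx, List.append_assoc]

lemma sorted_tri (xs : List String) :
    PySem.List.sorted xs pvPriority false
      = xs.filter (fun k => k == "read_train_passwords")
        ++ xs.filter (fun k => k == "read_test_passwords")
        ++ xs.filter (fun k => !(k == "read_train_passwords" || k == "read_test_passwords")) := by
  have e0 : ∀ k : String, (pvPriority k == 0) = (k == "read_train_passwords") := by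
    intro k; unfold pvPriority; split_ifs with h1 h2 <;> simp_all
  have e1 : ∀ k : String, (pvPriority k == 1) = (k == "read_test_passwords") := by
    intro k; unfold pvPriority; split_ifs with h1 h2 <;> simp_all
  have e2 : ∀ k : String, (pvPriority k == 2)
      = (!(k == "read_train_passwords" || k == "read_test_passwords")) := by
    intro k; unfold pvPriority; split_ifs with h1 h2 <;> simp_all
  rw [PySem.List.sorted_eq_foldl_insertBy]
  have := foldl_tri xs [] [] [] (by simp) (by simp) (by simp)
  simp only [List.nil_append] at this
  rw [this, List.filter_congr (fun k _ => e0 k), List.filter_congr (fun k _ => e1 k),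
      List.filter_congr (fun k _ => e2 k)]

lemma filter_beq_of_nodup (l : List String) (a : String) (h : l.Nodup) :
    l.filter (fun k => k == a) = if l.contains a then [a] else [] := by
  rw [List.filter_beq]
  by_cases hm : a ∈ l
  · rw [List.count_eq_one_of_mem h hm]; simp [hm]
  · rw [List.count_eq_zero_of_not_mem hm]; simp [hm]

-- ===== VERDICT (by name: the statement is the Claim_ definition above) =====
theorem custom_key_order_spec : Claim_equal_custom_key_order := by
  intro d _ hpre
  unfold Spec_custom_key_order custom_key_order custom_key_order_alt
  rw [sorted_tri, filter_beq_of_nodup _ _ hpre, filter_beq_of_nodup _ _ hpre]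
  split_ifs with htr hte hte <;> simp_all
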